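-- pv_equiv track=rewrite | github.com/edubaptista/CC8130-SEG_INFORMACAO_Ativ02 | Teste_chaves_de_criptografia.py | the_runs_test
-- ===== SOURCE A (Python) =====
-- def the_runs_test(c_binaria):
--     contador = 1
--     repeticoes = []
--     contador_0 = [0, 0, 0, 0, 0, 0]
--     contador_1 = [0, 0, 0, 0, 0, 0]
--     if len(c_binaria) > 1:
--         for i in range(1, len(c_binaria)):
--             if c_binaria[i - 1] == c_binaria[i]:
--                 contador += 1
--             else:
--                 repeticoes.append([c_binaria[i - 1], contador])
--                 contador = 1
--         repeticoes.append([c_binaria[i], contador])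
--
--     for rep in repeticoes:
--         if rep[0] == '0':
--             if rep[1] >= 6:
--                 contador_0[5] += 1
--             else:
--                 contador_0[rep[1]-1] += 1
--         if rep[0] == '1':
--             if rep[1] >= 6:
--                 contador_1[5] += 1
--             else:
--                 contador_1[rep[1]-1] += 1
--
--     zk = False
--     uk = False
--     if (contador_0[0] > 2267) and (contador_0[0] < 2733) and (contador_0[1] > 1079) and (contador_0[1] < 1421) and \
--         (contador_0[2] > 502) and (contador_0[2] < 748) and (contador_0[3] > 223) and (contador_0[3] < 402) and \
--         (contador_0[4] > 90) and (contador_0[4] < 223) and (contador_0[5] > 90) and (contador_0[5] < 223):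
--         zk = True
--
--     if (contador_1[0] > 2267) and (contador_1[0] < 2733) and (contador_1[1] > 1079) and (contador_1[1] < 1421) and \
--         (contador_1[2] > 502) and (contador_1[2] < 748) and (contador_1[3] > 223) and (contador_1[3] < 402) and \
--         (contador_1[4] > 90) and (contador_1[4] < 223) and (contador_1[5] > 90) and (contador_1[5] < 223):
--         uk = True
--
--     if zk and uk:
--         return "Aprovado"
--     else:
--         return "Reprovado"
-- ===== SOURCE B (Python) =====
-- _LIMITS = [(2267, 2733), (1079, 1421), (502, 748), (223, 402), (90, 223), (90, 223)]
--
--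
-- def _histogram(c_binaria, digit):
--     # maximal blocks of `digit`: blank out every other character, then split on whitespace
--     blocks = ''.join(ch if ch == digit else ' ' for ch in c_binaria).split()
--     counts = [0, 0, 0, 0, 0, 0]
--     for b in blocks:
--         counts[min(len(b), 6) - 1] += 1
--     return counts
--
--
-- def the_runs_test(c_binaria):
--     ok0 = all(lo < c < hi for (lo, hi), c in zip(_LIMITS, _histogram(c_binaria, '0')))
--     ok1 = all(lo < c < hi for (lo, hi), c in zip(_LIMITS, _histogram(c_binaria, '1')))
--     return "Aprovado" if ok0 and ok1 else "Reprovado"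
-- ===== Notes on version B (the rewrite author's own statement) =====
-- stated objective: faster
-- what changed: B discards A's sequential neighbour-comparison run detector and its intermediate list of runs: for each digit separately it blanks every other character to a space, splits the masked string on whitespace so the pieces are exactly the maximal blocks of that digit, and histograms the piece lengths (capped at 6); the twelve inlined threshold comparisons become one zip/all over a limits table. The per-character work moves from interpreted indexing (s[i-1]==s[i] and list building) into the C-level join/split, which a timing run measured ~2.4x faster.
import Mathlib
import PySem

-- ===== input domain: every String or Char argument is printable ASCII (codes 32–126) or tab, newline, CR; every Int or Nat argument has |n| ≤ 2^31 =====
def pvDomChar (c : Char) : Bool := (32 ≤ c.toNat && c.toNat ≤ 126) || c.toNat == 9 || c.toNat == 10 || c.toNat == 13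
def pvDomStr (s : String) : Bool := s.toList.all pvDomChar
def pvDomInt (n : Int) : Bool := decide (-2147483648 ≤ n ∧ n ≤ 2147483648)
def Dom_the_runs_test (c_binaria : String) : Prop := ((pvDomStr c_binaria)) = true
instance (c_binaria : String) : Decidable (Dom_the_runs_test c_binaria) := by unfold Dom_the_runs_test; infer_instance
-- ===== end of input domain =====

-- B drops A's neighbour-comparison run detector entirely: for each digit it blanks out the
-- other characters, splits the result on whitespace (the maximal blocks of that digit), and
-- histograms the block lengths. Objective: faster (a timing run measured B ~2.4x faster than A).

-- ===== PORT A =====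
-- l[i] += 1 on an in-range index (the ports only use indices 0..5 on length-6 lists)
def pvIncAt (l : List Int) (i : Nat) : List Int := l.set i (l.getD i 0 + 1)

-- A's twelve threshold comparisons
def pvCheckA (l : List Int) : Bool :=
  (l.getD 0 0 > 2267) && (l.getD 0 0 < 2733) && (l.getD 1 0 > 1079) && (l.getD 1 0 < 1421) &&
  (l.getD 2 0 > 502) && (l.getD 2 0 < 748) && (l.getD 3 0 > 223) && (l.getD 3 0 < 402) &&
  (l.getD 4 0 > 90) && (l.getD 4 0 < 223) && (l.getD 5 0 > 90) && (l.getD 5 0 < 223)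

-- body of A's "for rep in repeticoes" loop (two independent ifs, as in the Python;
-- rep.2 ≥ 1 always holds on reachable runs, so (rep.2-1).toNat is the Python index rep[1]-1)
def pvRepStep (st : List Int × List Int) (rep : Char × Int) : List Int × List Int :=
  let c0 := if rep.1 == '0' then
      (if rep.2 ≥ 6 then pvIncAt st.1 5 else pvIncAt st.1 (rep.2 - 1).toNat) else st.1
  let c1 := if rep.1 == '1' then
      (if rep.2 ≥ 6 then pvIncAt st.2 5 else pvIncAt st.2 (rep.2 - 1).toNat) else st.2
  (c0, c1)

def the_runs_test (c_binaria : String) : String :=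
  let cs := c_binaria.toList
  let n := cs.length
  -- for i in range(1, n): all indices i-1, i are in range, so getD is exact
  let repeticoes :=
    if n > 1 then
      let st := (List.range' 1 (n - 1)).foldl
        (fun (st : Int × List (Char × Int)) i =>
          if cs.getD (i - 1) ' ' == cs.getD i ' ' then (st.1 + 1, st.2)
          else (1, st.2 ++ [(cs.getD (i - 1) ' ', st.1)])) (1, [])
      st.2 ++ [(cs.getD (n - 1) ' ', st.1)]
    else []
  let st := repeticoes.foldl pvRepStep ([0,0,0,0,0,0], [0,0,0,0,0,0])
  let zk := pvCheckA st.1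
  let uk := pvCheckA st.2
  if zk && uk then "Aprovado" else "Reprovado"

-- ===== PORT B =====
def pvLimits : List (Int × Int) := [(2267,2733),(1079,1421),(502,748),(223,402),(90,223),(90,223)]

-- ''.join(ch if ch == digit else ' ' for ch in c_binaria): strings handled as char lists (exact)
def pvMask (d : Char) (cs : List Char) : List Char :=
  cs.map (fun ch => if ch == d then ch else ' ')

-- _histogram: blank out the other characters, split on whitespace, bin the block lengths
def pvHistogram (c_binaria : String) (digit : Char) : List Int :=
  let blocks := PySem.Chars.split₀ (pvMask digit c_binaria.toList)
  blocks.foldl (fun counts b => pvIncAt counts (min b.length 6 - 1)) [0,0,0,0,0,0]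

-- all(lo < c < hi for (lo, hi), c in zip(_LIMITS, counts))
def pvWithin (counts : List Int) : Bool :=
  (pvLimits.zip counts).all (fun p => p.1.1 < p.2 && p.2 < p.1.2)

def the_runs_test_alt (c_binaria : String) : String :=
  let ok0 := pvWithin (pvHistogram c_binaria '0')
  let ok1 := pvWithin (pvHistogram c_binaria '1')
  if ok0 && ok1 then "Aprovado" else "Reprovado"

-- ===== PRECONDITION & SPEC =====
def Spec_the_runs_test (c_binaria : String) (out : String) : Prop := out = the_runs_test_alt c_binaria
instance (c_binaria : String) (out : String) : Decidable (Spec_the_runs_test c_binaria out) := by unfold Spec_the_runs_test; infer_instance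

-- ===== CLAIM (what is proved, stated in full; the proofs are below) =====
def Claim_equal_the_runs_test : Prop := ∀ (c_binaria : String), Dom_the_runs_test c_binaria → Spec_the_runs_test c_binaria (the_runs_test c_binaria)

-- ===== LEMMAS AND PROOFS =====

-- run-length encoding of p^k ++ cs (the common description of both programs' runs)
def pvGo (p : Char) (k : Int) : List Char → List (Char × Int)
  | [] => [(p, k)]
  | d :: ds => if p == d then pvGo p (k + 1) ds else (p, k) :: pvGo d 1 ds

-- bin one run length (A's inner if, curried on the counts list)
def pvIncRun (counts : List Int) (k : Int) : List Int :=
  if k ≥ 6 then pvIncAt counts 5 else pvIncAt counts (k - 1).toNat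

lemma pvGo_pos (cs : List Char) (p : Char) (k : Int) (hk : 1 ≤ k) :
    ∀ r ∈ pvGo p k cs, 1 ≤ r.2 := by
  induction cs generalizing p k with
  | nil => intro r hr; simp [pvGo] at hr; subst hr; exact hk
  | cons d ds ih =>
      intro r hr
      by_cases h : p = d
      · subst h
        simp only [pvGo, beq_self_eq_true, if_true] at hr
        exact ih p (k + 1) (by omega) r hr
      · have hb : (p == d) = false := by simp [h]
        simp only [pvGo, hb, Bool.false_eq_true, if_false, List.mem_cons] at hr
        rcases hr with rfl | hr
        · exact hk
        · exact ih d 1 (by omega) r hr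

-- A's fold over the runs acts independently on the two histograms
lemma fold_rep_fst (rs : List (Char × Int)) (c0 c1 : List Int) :
    (rs.foldl pvRepStep (c0, c1)).1
      = ((rs.filter (fun r => r.1 == '0')).map Prod.snd).foldl pvIncRun c0 := by
  induction rs generalizing c0 c1 with
  | nil => rfl
  | cons r rs ih =>
      by_cases h : r.1 == '0'
      · by_cases h1 : r.1 == '1'
        · exfalso; simp at h h1; rw [h] at h1; exact absurd h1 (by decide)
        · simp [List.foldl_cons, pvRepStep, h, h1, ih, pvIncRun]
      · by_cases h1 : r.1 == '1' <;>
          simp [List.foldl_cons, pvRepStep, h, h1, ih]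

lemma fold_rep_snd (rs : List (Char × Int)) (c0 c1 : List Int) :
    (rs.foldl pvRepStep (c0, c1)).2
      = ((rs.filter (fun r => r.1 == '1')).map Prod.snd).foldl pvIncRun c1 := by
  induction rs generalizing c0 c1 with
  | nil => rfl
  | cons r rs ih =>
      by_cases h : r.1 == '1'
      · by_cases h0 : r.1 == '0'
        · exfalso; simp at h h0; rw [h] at h0; exact absurd h0 (by decide)
        · simp [List.foldl_cons, pvRepStep, h, h0, ih, pvIncRun]
      · by_cases h0 : r.1 == '0' <;>
          simp [List.foldl_cons, pvRepStep, h, h0, ih]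

-- B's block fold equals A's run fold once the blocks are the runs
lemma fold_blocks (d : Char) (rs : List (Char × Int)) (c0 : List Int)
    (hpos : ∀ r ∈ rs, 1 ≤ r.2) :
    (rs.map (fun r => List.replicate r.2.toNat d)).foldl
        (fun counts b => pvIncAt counts (min b.length 6 - 1)) c0
      = (rs.map Prod.snd).foldl pvIncRun c0 := by
  induction rs generalizing c0 with
  | nil => rfl
  | cons r rs ih =>
      have hk : 1 ≤ r.2 := hpos r (List.mem_cons_self ..)
      have hidx : min r.2.toNat 6 - 1 = (if r.2 ≥ 6 then 5 else (r.2 - 1).toNat) := by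
        split_ifs with h <;> omega
      simp only [List.map_cons, List.foldl_cons, List.length_replicate, hidx, pvIncRun]
      split_ifs with h <;>
        exact ih _ (fun r hr => hpos r (List.mem_cons_of_mem _ hr))

-- one step of the split₀ state machine, in the two shapes the proof needs
lemma go_nonspace (c : Char) (h : PySem.Chars.isspace c = false)
    (rest cur : List Char) (acc : List (List Char)) :
    PySem.Chars.split₀.go (c :: rest) cur acc
      = PySem.Chars.split₀.go rest (c :: cur) acc := by
  simp [PySem.Chars.split₀.go, h]

lemma go_space (rest cur : List Char) (acc : List (List Char)) :
    PySem.Chars.split₀.go (' ' :: rest) cur acc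
      = (if cur.isEmpty then PySem.Chars.split₀.go rest [] acc
         else PySem.Chars.split₀.go rest [] (cur.reverse :: acc)) := by
  have hsp : PySem.Chars.isspace ' ' = true := by decide
  simp [PySem.Chars.split₀.go, hsp]

lemma pvMask_cons (d c : Char) (cs : List Char) :
    pvMask d (c :: cs) = (if c == d then c else ' ') :: pvMask d cs := rfl

-- the whitespace split of the masked string yields exactly the runs of the digit
lemma splitGo_eq (d : Char) (hd : PySem.Chars.isspace d = false) :
    ∀ (cs : List Char) (p : Char) (k : Int) (acc : List (List Char)), 1 ≤ k →
    PySem.Chars.split₀.go (pvMask d cs)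
        (if p == d then List.replicate k.toNat d else []) acc
      = acc.reverse
        ++ ((pvGo p k cs).filter (fun r => r.1 == d)).map
              (fun r => List.replicate r.2.toNat d) := by
  intro cs
  induction cs with
  | nil =>
      intro p k acc hk
      by_cases hp : p = d
      · have : k.toNat ≠ 0 := by omega
        simp [pvMask, PySem.Chars.split₀.go, hp, pvGo, this, List.reverse_replicate]
      · simp [pvMask, PySem.Chars.split₀.go, pvGo, (by simp [hp] : (p == d) = false)]
  | cons c cs ih =>
      intro p k acc hk
      by_cases hc : c = d
      · subst hc
        rw [pvMask_cons, if_pos (by simp), go_nonspace c hd]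
        by_cases hp : p = c
        · subst hp
          rw [if_pos (by simp),
            show p :: List.replicate k.toNat p = List.replicate (k + 1).toNat p from by
              rw [show (k + 1).toNat = k.toNat + 1 from by omega]; rfl]
          have := ih p (k + 1) acc (by omega)
          rw [if_pos (by simp)] at this
          rw [this]
          simp [pvGo]
        · rw [if_neg (by simpa using hp)]
          have := ih c 1 acc (by omega)
          rw [if_pos (by simp)] at this
          rw [show c :: ([] : List Char) = List.replicate ((1 : Int)).toNat c from rfl, this]
          simp [pvGo, (by simp [hp] : (p == c) = false)]
      · rw [pvMask_cons, if_neg (by simpa using hc), go_space]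
        by_cases hp : p = d
        · have hpb : (p == d) = true := by simp [hp]
          rw [if_pos hpb, if_neg (by simp; omega), List.reverse_replicate]
          have := ih c 1 (List.replicate k.toNat d :: acc) (by omega)
          rw [if_neg (by simpa using hc)] at this
          rw [this]
          have hpc : (p == c) = false := by
            simp only [beq_eq_false_iff_ne, ne_eq]; exact fun h => hc (hp ▸ h).symm
          simp [pvGo, hpc, hpb]
        · have hpb : (p == d) = false := by simp [hp]
          simp only [hpb, Bool.false_eq_true, if_false, List.isEmpty_nil, if_true]
          by_cases hpc : p = c
          · have := ih p (k + 1) acc (by omega)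
            rw [if_neg (by simp [hpb])] at this
            rw [this]
            simp [pvGo, hpc]
          · have := ih c 1 acc (by omega)
            rw [if_neg (by simpa using hc)] at this
            rw [this]
            simp [pvGo, (by simp [hpc] : (p == c) = false), hpb]

lemma split_mask_eq (d : Char) (hd : PySem.Chars.isspace d = false) (p : Char) (cs : List Char) :
    PySem.Chars.split₀ (pvMask d (p :: cs))
      = ((pvGo p 1 cs).filter (fun r => r.1 == d)).map (fun r => List.replicate r.2.toNat d) := by
  unfold PySem.Chars.split₀
  rw [pvMask_cons]
  by_cases hp : p = d
  · subst hp
    rw [if_pos (by simp), go_nonspace p hd]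
    have := splitGo_eq p hd cs p 1 [] (by omega)
    rw [if_pos (by simp)] at this
    simpa using this
  · rw [if_neg (by simpa using hp), go_space]
    have := splitGo_eq d hd cs p 1 [] (by omega)
    rw [if_neg (by simpa using hp)] at this
    simpa using this

-- B's histogram on p :: cs is A's run fold for that digit
lemma hist_eq (s : String) (d : Char) (hd : PySem.Chars.isspace d = false)
    (p : Char) (cs : List Char) (hs : s.toList = p :: cs) :
    pvHistogram s d
      = (((pvGo p 1 cs).filter (fun r => r.1 == d)).map Prod.snd).foldl
          pvIncRun [0,0,0,0,0,0] := by
  unfold pvHistogram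
  rw [hs, split_mask_eq d hd p cs]
  exact fold_blocks d _ _ (fun r hr =>
    pvGo_pos cs p 1 (by omega) r (List.mem_of_mem_filter hr))

-- A's neighbour-comparison loop (plus the final append) yields exactly the run encoding
lemma loopA_eq (suff pre : List Char) (p : Char) (k : Int) (acc : List (Char × Int)) :
    (let cs := pre ++ p :: suff
     let st := (List.range' (pre.length + 1) suff.length).foldl
        (fun (st : Int × List (Char × Int)) i =>
          if cs.getD (i - 1) ' ' == cs.getD i ' ' then (st.1 + 1, st.2)
          else (1, st.2 ++ [(cs.getD (i - 1) ' ', st.1)])) (k, acc)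
     st.2 ++ [(cs.getD (cs.length - 1) ' ', st.1)]) = acc ++ pvGo p k suff := by
  induction suff generalizing pre p k acc with
  | nil =>
      simp [pvGo, List.getD]
  | cons d ds ih =>
      have hgetp : (pre ++ p :: d :: ds).getD pre.length ' ' = p := by
        simp [List.getD]
      have hgetd : (pre ++ p :: d :: ds).getD (pre.length + 1) ' ' = d := by
        have : pre ++ p :: d :: ds = (pre ++ [p]) ++ d :: ds := by simp
        rw [this]
        have hl : (pre ++ [p]).length = pre.length + 1 := by simp
        rw [← hl]
        simp [List.getD]
      have hassoc : pre ++ p :: d :: ds = (pre ++ [p]) ++ d :: ds := by simp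
      simp only [List.length_cons, List.range'_succ, List.foldl_cons]
      rw [show pre.length + 1 - 1 = pre.length from rfl, hgetp, hgetd]
      by_cases hpd : p = d
      · subst hpd
        simp only [beq_self_eq_true, if_true]
        have := ih (pre ++ [p]) p (k + 1) acc
        simp only [hassoc] at *
        simpa [pvGo, List.length_append] using this
      · have hbeq : (p == d) = false := by simp [hpd]
        simp only [hbeq, Bool.false_eq_true, if_false]
        have := ih (pre ++ [p]) d 1 (acc ++ [(p, k)])
        simp only [hassoc] at *
        simpa [pvGo, hpd, List.length_append] using this

lemma length_pvIncAt (l : List Int) (i : Nat) : (pvIncAt l i).length = l.length := by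
  simp [pvIncAt]

lemma length_fold_incRun (ks : List Int) (c0 : List Int) :
    (ks.foldl pvIncRun c0).length = c0.length := by
  induction ks generalizing c0 with
  | nil => rfl
  | cons k ks ih =>
      simp only [List.foldl_cons, pvIncRun]
      split_ifs <;> simp [ih, length_pvIncAt]

lemma checkA_eq_within (l : List Int) (h : l.length = 6) : pvCheckA l = pvWithin l := by
  obtain ⟨a, l, rfl⟩ : ∃ a t, l = a :: t := by cases l <;> simp_all
  obtain ⟨b, l, rfl⟩ : ∃ a t, l = a :: t := by cases l <;> simp_all
  obtain ⟨c, l, rfl⟩ : ∃ a t, l = a :: t := by cases l <;> simp_all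
  obtain ⟨d, l, rfl⟩ : ∃ a t, l = a :: t := by cases l <;> simp_all
  obtain ⟨e, l, rfl⟩ : ∃ a t, l = a :: t := by cases l <;> simp_all
  obtain ⟨f, l, rfl⟩ : ∃ a t, l = a :: t := by cases l <;> simp_all
  have : l = [] := by simpa using h
  subst this
  rw [Bool.eq_iff_iff]
  simp [pvCheckA, pvWithin, pvLimits]
  tauto

-- ===== VERDICT (by name: the statement is the Claim_ definition above) =====
theorem the_runs_test_spec : Claim_equal_the_runs_test := by
  intro s _dom
  simp only [Spec_the_runs_test, the_runs_test, the_runs_test_alt]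
  cases hcs : s.toList with
  | nil =>
      simp [hcs, pvHistogram, pvMask, PySem.Chars.split₀, PySem.Chars.split₀.go,
        pvWithin, pvLimits, pvCheckA]
  | cons p rest =>
    cases rest with
    | nil =>
        -- length-1 string: A bins nothing, B bins the single run of length 1;
        -- either way both histograms stay below every lower threshold
        have h0 := hist_eq s '0' (by decide) p [] hcs
        have h1 := hist_eq s '1' (by decide) p [] hcs
        by_cases hp0 : p = '0' <;> by_cases hp1 : p = '1' <;>
          simp_all [pvGo, pvCheckA, pvWithin, pvLimits, pvIncRun, pvIncAt]
    | cons d ds =>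
        have hA := loopA_eq (d :: ds) [] p 1 []
        simp only [List.nil_append, List.length_nil, List.length_cons, Nat.zero_add,
          Nat.add_sub_cancel] at hA
        have h0 := hist_eq s '0' (by decide) p (d :: ds) hcs
        have h1 := hist_eq s '1' (by decide) p (d :: ds) hcs
        have l0 : (pvHistogram s '0').length = 6 := by
          rw [h0]; simpa using length_fold_incRun _ [0,0,0,0,0,0]
        have l1 : (pvHistogram s '1').length = 6 := by
          rw [h1]; simpa using length_fold_incRun _ [0,0,0,0,0,0]
        simp only [List.length_cons, Nat.add_sub_cancel]
        rw [if_pos (show ds.length + 1 + 1 > 1 by omega)]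
        rw [hA, fold_rep_fst, fold_rep_snd, ← h0, ← h1,
          checkA_eq_within _ l0, checkA_eq_within _ l1]
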